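-- pv_equiv track=rewrite | github.com/bjmoonn/DocuGen | src/models/code_documentation_analyzer.py | _get_relevant_chunks
-- ===== SOURCE A (Python) =====
-- from typing import List, Dict
--
-- def _get_relevant_chunks(content: str, keywords: List[str]) -> List[str]:
--     """
--     extracts relevant documentation chunks based on keywords.
--
--     args:
--         content (str): documentation content
--         keywords (list): relevant keywords to search for
--
--     returns:
--         list: relevant documentation chunks
--     """
--     chunks = []
--     lines = content.split('\n')
--     current_chunk = []
--
--     for line in lines:
--         line_lower = line.lower()
--         if any(keyword in line_lower for keyword in keywords):
--             if current_chunk: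
--                 chunks.append('\n'.join(current_chunk))
--             current_chunk = [line]
--         elif current_chunk:
--             current_chunk.append(line)
--             if len(current_chunk) > 10:
--                 chunks.append('\n'.join(current_chunk))
--                 current_chunk = []
--
--     if current_chunk:
--         chunks.append('\n'.join(current_chunk))
--
--     return chunks
-- ===== SOURCE B (Python) =====
-- from typing import List
--
-- def _get_relevant_chunks(content: str, keywords: List[str]) -> List[str]:
--     """Boundary-driven rewrite: walk the line list by explicit slicing instead of
--     a stateful accumulator — skip to a keyword line, cut its chunk (the line plus
--     up to 10 following non-keyword lines) in one slice, and continue after it."""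
--     def is_match(line):
--         line_lower = line.lower()
--         return any(keyword in line_lower for keyword in keywords)
--
--     chunks = []
--     rest = content.split('\n')
--     while rest:
--         head, tail = rest[0], rest[1:]
--         if not is_match(head):
--             rest = tail
--             continue
--         body = []
--         for line in tail[:10]:
--             if is_match(line):
--                 break
--             body.append(line)
--         chunks.append('\n'.join([head] + body))
--         rest = tail[len(body):]
--     return chunks
-- ===== Notes on version B (the rewrite author's own statement) =====
-- stated objective: alternative
-- what changed: Replaces A's stateful current_chunk accumulator and flush-on-overflow bookkeeping with boundary-driven slicing: skip to the next keyword line, cut its chunk (the line plus up to 10 following non-keyword lines) in one slice, and resume right after it.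
import Mathlib
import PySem

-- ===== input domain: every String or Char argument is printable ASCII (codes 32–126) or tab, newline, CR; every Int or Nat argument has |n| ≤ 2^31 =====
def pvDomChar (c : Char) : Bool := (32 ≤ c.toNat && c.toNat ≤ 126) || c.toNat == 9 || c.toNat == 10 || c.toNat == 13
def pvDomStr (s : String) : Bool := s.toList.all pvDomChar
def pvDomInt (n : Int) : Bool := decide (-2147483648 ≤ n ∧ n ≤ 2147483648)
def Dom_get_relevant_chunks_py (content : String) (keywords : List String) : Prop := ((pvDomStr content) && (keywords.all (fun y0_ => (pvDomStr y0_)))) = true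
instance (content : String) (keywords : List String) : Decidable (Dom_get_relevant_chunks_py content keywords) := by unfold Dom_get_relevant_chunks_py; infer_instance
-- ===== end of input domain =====

-- B replaces A's stateful current_chunk accumulator by explicit boundary slicing
-- (skip to a keyword line, cut its ≤11-line chunk in one slice, continue after it);
-- objective: alternative decomposition, same asymptotic cost.

-- ===== PORT A =====
-- 'any(keyword in line.lower() for keyword in keywords)' — the same expression both Pythons contain
def pvIsMatch (keywords : List String) (line : String) : Bool :=
  let line_lower := PySem.Str.lower line
  keywords.any (fun keyword => PySem.Str.isIn keyword line_lower)

-- the body of A's for-loop, state = (chunks, current_chunk)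
def pvAStep (keywords : List String) (st : List String × List String) (line : String) :
    List String × List String :=
  let chunks := st.1
  let current_chunk := st.2
  if pvIsMatch keywords line then
    ((if current_chunk.isEmpty then chunks else chunks ++ [PySem.Str.join "\n" current_chunk]), [line])
  else if !current_chunk.isEmpty then
    let current_chunk := current_chunk ++ [line]
    if current_chunk.length > 10 then (chunks ++ [PySem.Str.join "\n" current_chunk], [])
    else (chunks, current_chunk)
  else (chunks, current_chunk)

-- A's trailing 'if current_chunk: chunks.append(...)'
def pvAFinish (st : List String × List String) : List String :=
  if st.2.isEmpty then st.1 else st.1 ++ [PySem.Str.join "\n" st.2]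

def get_relevant_chunks_py (content : String) (keywords : List String) : List String :=
  -- content.split('\n'): sep is the non-empty literal "\n", so split? is always some
  let lines := (PySem.Str.split? content "\n").getD []
  pvAFinish (lines.foldl (pvAStep keywords) ([], []))

-- ===== PORT B =====
-- Source B's while-loop over the remaining line list, transcribed as recursion on that list
def pvAltLoop (keywords : List String) : List String → List String
  | [] => []
  | head :: tail =>
    if !pvIsMatch keywords head then pvAltLoop keywords tail
    else
      -- 'for line in tail[:10]: if is_match(line): break; body.append(line)'
      let body := (PySem.List.slice tail (some 0) (some 10)).takeWhile
        (fun line => !pvIsMatch keywords line)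
      -- 'rest = tail[len(body):]' (nonnegative slice start = drop)
      PySem.Str.join "\n" (head :: body) :: pvAltLoop keywords (tail.drop body.length)
termination_by ls => ls.length
decreasing_by
  all_goals refine Nat.lt_succ_of_le ?_
  · exact Nat.le_refl _
  · rw [List.length_drop]
    exact Nat.sub_le _ _

def get_relevant_chunks_py_alt (content : String) (keywords : List String) : List String :=
  -- content.split('\n'): sep is the non-empty literal "\n", so split? is always some
  pvAltLoop keywords ((PySem.Str.split? content "\n").getD [])

-- ===== PRECONDITION & SPEC =====
def Spec_get_relevant_chunks_py (content : String) (keywords : List String) (out : List String) : Prop := out = get_relevant_chunks_py_alt content keywords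
instance (content : String) (keywords : List String) (out : List String) : Decidable (Spec_get_relevant_chunks_py content keywords out) := by unfold Spec_get_relevant_chunks_py; infer_instance

-- ===== CLAIM (what is proved, stated in full; the proofs are below) =====
def Claim_equal_get_relevant_chunks_py : Prop := ∀ (content : String) (keywords : List String), Dom_get_relevant_chunks_py content keywords → Spec_get_relevant_chunks_py content keywords (get_relevant_chunks_py content keywords)

-- ===== LEMMAS AND PROOFS =====

-- pvG kw cur ls: what A's remaining loop over ls emits from accumulator cur
def pvG (kw : List String) (cur : List String) : List String → List String
  | [] => if cur.isEmpty then [] else [PySem.Str.join "\n" cur]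
  | l :: t =>
    if pvIsMatch kw l then
      (if cur.isEmpty then [] else [PySem.Str.join "\n" cur]) ++ pvG kw [l] t
    else if cur.isEmpty then pvG kw cur t
    else if 10 ≤ cur.length then PySem.Str.join "\n" (cur ++ [l]) :: pvG kw [] t
    else pvG kw (cur ++ [l]) t

theorem pvFold_eq_G (kw : List String) (ls : List String) :
    ∀ (chunks cur : List String),
      pvAFinish (ls.foldl (pvAStep kw) (chunks, cur)) = chunks ++ pvG kw cur ls := by
  induction ls with
  | nil =>
    intro chunks cur
    simp only [List.foldl_nil, pvAFinish, pvG]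
    split <;> simp
  | cons l t ih =>
    intro chunks cur
    simp only [List.foldl_cons, pvAStep, pvG]
    by_cases hm : pvIsMatch kw l
    · simp only [hm, if_true]
      by_cases hc : cur.isEmpty <;> simp [hc, ih, List.append_assoc]
    · simp only [hm, Bool.not_eq_true']
      by_cases hc : cur.isEmpty
      · simp [hc, ih]
      · by_cases hl : 10 ≤ cur.length <;>
          simp [hc, hl, ih, List.append_assoc]

-- the chunk A cuts from a nonempty accumulator: the next up-to-(11 - |cur|)
-- non-matching lines complete it, and the loop resumes right after them
theorem pvG_nonempty (kw : List String) (t : List String) :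
    ∀ (cur : List String), cur ≠ [] → cur.length ≤ 10 →
      pvG kw cur t =
        PySem.Str.join "\n"
            (cur ++ (t.take (11 - cur.length)).takeWhile (fun l => !pvIsMatch kw l)) ::
          pvG kw []
            (t.drop (((t.take (11 - cur.length)).takeWhile (fun l => !pvIsMatch kw l)).length)) := by
  induction t with
  | nil =>
    intro cur hne _
    simp [pvG, hne]
  | cons l t ih =>
    intro cur hne hlen
    have hce : cur.isEmpty = false := by simpa [List.isEmpty_iff] using hne
    have h11 : 11 - cur.length = (10 - cur.length) + 1 := by omega
    by_cases hm : pvIsMatch kw l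
    · simp [pvG, hm, hce, h11]
    · by_cases hten : 10 ≤ cur.length
      · have hten' : cur.length = 10 := by omega
        simp [pvG, hm, hce, hten, hten', List.takeWhile]
      · have hne' : cur ++ [l] ≠ [] := by simp
        have hlen' : (cur ++ [l]).length ≤ 10 := by
          simp only [List.length_append, List.length_cons, List.length_nil]; omega
        have h10 : 11 - (cur ++ [l]).length = 10 - cur.length := by
          simp only [List.length_append, List.length_cons, List.length_nil]; omega
        rw [pvG, if_neg (by simp [hm]), if_neg (by simp [hce]), if_neg hten,
          ih (cur ++ [l]) hne' hlen', h10, h11]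
        simp [hm, List.append_assoc]

theorem pvAlt_eq_G (kw : List String) :
    ∀ (n : ℕ) (ls : List String), ls.length ≤ n → pvAltLoop kw ls = pvG kw [] ls := by
  intro n
  induction n with
  | zero =>
    intro ls h
    have : ls = [] := by cases ls <;> simp_all
    subst this
    rw [pvAltLoop.eq_def]
    simp [pvG]
  | succ n ih =>
    intro ls h
    cases ls with
    | nil =>
      rw [pvAltLoop.eq_def]
      simp [pvG]
    | cons l t =>
      by_cases hm : pvIsMatch kw l
      · have hsl : PySem.List.slice t (some 0) (some 10) = t.take 10 := by
          rw [PySem.List.slice_zero_start, PySem.List.slice_to _ (by norm_num)]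
          congr 1
        have hG := pvG_nonempty kw t [l] (by simp) (by simp)
        norm_num at hG
        have hL : pvAltLoop kw (l :: t) =
            PySem.Str.join "\n"
                (l :: ((t.take 10).takeWhile (fun line => !pvIsMatch kw line))) ::
              pvAltLoop kw
                (t.drop (((t.take 10).takeWhile (fun line => !pvIsMatch kw line)).length)) := by
          rw [pvAltLoop.eq_def]
          simp [hm, hsl]
        have hR : pvG kw [] (l :: t) = pvG kw [l] t := by simp [pvG, hm]
        rw [hL, hR, hG]
        congr 1
        apply ih
        have hT := List.IsPrefix.length_le
          (List.takeWhile_prefix (l := t.take 10) (fun l => !pvIsMatch kw l))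
        simp at h ⊢
        omega
      · have hL : pvAltLoop kw (l :: t) = pvAltLoop kw t := by
          rw [pvAltLoop.eq_def]
          simp [hm]
        have hR : pvG kw [] (l :: t) = pvG kw [] t := by simp [pvG, hm]
        rw [hL, hR]
        exact ih t (by simp at h; omega)

-- ===== VERDICT (by name: the statement is the Claim_ definition above) =====
theorem get_relevant_chunks_py_spec : Claim_equal_get_relevant_chunks_py := by
  intro content keywords _
  unfold Spec_get_relevant_chunks_py get_relevant_chunks_py get_relevant_chunks_py_alt
  rw [pvFold_eq_G, pvAlt_eq_G keywords ((PySem.Str.split? content "\n").getD []).length _ (le_refl _)]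
  simp
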